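-- pv_equiv track=rewrite | github.com/taxijjang/algorithm | 2022 kakao blind 공채/1번.py | solution
-- ===== SOURCE A (Python) =====
-- from collections import defaultdict
--
-- def solution(id_list, report, k):
--     users = defaultdict(set)
--     mails = defaultdict(set)
--     check_cnt = defaultdict(int)
--     overlap_check = defaultdict(dict)
--     for data in report:
--         user, target_user = data.split(' ')
--         users[user].add(target_user)
--         mails[target_user].add(user+target_user)
--         try:
--             overlap_check[user][target_user]
--         except KeyError:
--             overlap_check[user][target_user] = True
--             check_cnt[target_user] += 1
--
--     answer = []
--     for id in id_list:
--         cnt = 0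
--         for value in users[id]:
--             if check_cnt[value] >= k:
--                 cnt += 1
--         answer.append(cnt)
--
--     return answer
-- ===== SOURCE B (Python) =====
-- from collections import Counter
--
-- def solution(id_list, report, k):
--     pairs = {tuple(r.split(' ')) for r in report}
--     cnt = Counter(t for _, t in pairs)
--     result = {i: 0 for i in id_list}
--     for u, t in pairs:
--         if u in result and cnt[t] >= k:
--             result[u] += 1
--     return [result[i] for i in id_list]
-- ===== Notes on version B (the rewrite author's own statement) =====
-- stated objective: faster
-- what changed: A builds four defaultdicts (per-reporter target sets, an unused mails dict, and a try/except pair-dedup) and then loops over each id's target set; B dedups the reports into a set of (reporter,target) pairs once, counts reporters per target with a single Counter, and accumulates each id's answer in one pass over the deduped pairs.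
import Mathlib
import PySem

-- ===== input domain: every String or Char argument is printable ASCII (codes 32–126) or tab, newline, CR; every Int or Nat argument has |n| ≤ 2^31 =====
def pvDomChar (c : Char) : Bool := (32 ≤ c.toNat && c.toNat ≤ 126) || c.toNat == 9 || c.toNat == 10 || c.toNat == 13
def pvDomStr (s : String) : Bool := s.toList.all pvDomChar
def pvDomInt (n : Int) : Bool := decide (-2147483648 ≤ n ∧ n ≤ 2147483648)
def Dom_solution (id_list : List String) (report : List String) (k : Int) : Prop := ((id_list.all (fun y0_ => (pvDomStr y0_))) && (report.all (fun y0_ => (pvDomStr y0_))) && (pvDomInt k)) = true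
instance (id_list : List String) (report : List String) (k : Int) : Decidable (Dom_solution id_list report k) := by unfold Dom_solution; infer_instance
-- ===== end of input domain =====

-- B replaces A's four incrementally-built defaultdicts and per-id set scans by one deduped
-- set of (reporter,target) pairs, a Counter over its targets, and a single accumulating pass
-- (a constant-factor speed-up by doing less work per report line).


-- ===== PORT A =====
-- A's loop state: (users, mails, check_cnt, overlap_check)
abbrev StA : Type :=
  (PySem.Dict String (PySem.Set String)) × (PySem.Dict String (PySem.Set String)) ×
  (PySem.Dict String Int) × (PySem.Dict String (PySem.Dict String Bool))

def initA : StA := (PySem.Dict.empty, PySem.Dict.empty, PySem.Dict.empty, PySem.Dict.empty)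

-- A's loop body: "user, target_user = data.split(' ')" then the defaultdict updates; the
-- split? of the non-empty separator " " is always some (getD [] is never the default); the
-- '| _' branch is where Python raises ValueError unpacking (excluded by Pre_solution)
def bodyA (st : StA) (data : String) : StA :=
  match (PySem.Str.split? data " ").getD [] with
  | [user, target_user] =>
      let users := st.1.modify user PySem.Set.empty (fun s => PySem.Set.add s target_user)
      let mails := st.2.1.modify target_user PySem.Set.empty
                     (fun s => PySem.Set.add s (user ++ target_user))
      if (st.2.2.2.getD user PySem.Dict.empty).contains target_user then
        (users, mails, st.2.2.1, st.2.2.2)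
      else
        (users, mails, st.2.2.1.modify target_user 0 (· + 1),
         st.2.2.2.modify user PySem.Dict.empty (fun d => d.insert target_user true))
  | _ => st

-- literal port of A; the final loop over the set users[id] computes a count, which is
-- independent of Python's set-iteration order
def solution (id_list : List String) (report : List String) (k : Int) : List Int :=
  let st := report.foldl bodyA initA
  id_list.foldl
    (fun answer id =>
      answer ++ [(st.1.getD id PySem.Set.empty).foldl
        (fun cnt value => if k ≤ st.2.2.1.getD value 0 then cnt + 1 else cnt) 0])
    []

-- ===== PORT B =====
-- tuple(r.split(' ')): under Pre_solution the split has exactly two pieces; the getD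
-- defaults are only reached where Python B raises (excluded by Pre_solution)
def pairOf (r : String) : String × String :=
  (((PySem.Str.split? r " ").getD []).getD 0 "", ((PySem.Str.split? r " ").getD []).getD 1 "")

-- port of B: deduped pair set, Counter of the targets, one accumulating pass (per-key
-- counts, independent of Python's set-iteration order), re-emit per id_list position
def solution_alt (id_list : List String) (report : List String) (k : Int) : List Int :=
  let pairs := PySem.Set.ofList (report.map pairOf)
  let cnt := PySem.Dict.counter (pairs.map (fun p => p.2))
  let result0 := id_list.foldl (fun d i => d.insert i 0) PySem.Dict.empty
  let result := pairs.foldl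
    (fun d p => if d.contains p.1 && decide (k ≤ cnt.getD p.2 0) then d.modify p.1 0 (· + 1) else d)
    result0
  id_list.map (fun i => result.getD i 0)

-- ===== PRECONDITION & SPEC =====
-- Pre_solution excludes exactly the report lines that are not "<reporter> <target>" with a
-- single space: on such lines Python A raises ValueError unpacking the split (B raises too).
def Pre_solution (id_list : List String) (report : List String) (k : Int) : Prop :=
  ∀ r ∈ report, ((PySem.Str.split? r " ").getD []).length = 2
instance (id_list : List String) (report : List String) (k : Int) :
    Decidable (Pre_solution id_list report k) := by unfold Pre_solution; infer_instance

def pvWitness_solution : List String × List String × Int :=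
  (["muzi", "frodo", "apeach", "neo"],
   ["muzi frodo", "apeach frodo", "frodo neo", "muzi neo", "apeach muzi"], 2)

def Spec_solution (id_list : List String) (report : List String) (k : Int) (out : List Int) : Prop := out = solution_alt id_list report k
instance (id_list : List String) (report : List String) (k : Int) (out : List Int) : Decidable (Spec_solution id_list report k out) := by unfold Spec_solution; infer_instance

-- ===== CLAIM (what is proved, stated in full; the proofs are below) =====
def Claim_equal_solution : Prop := ∀ (id_list : List String) (report : List String) (k : Int), Dom_solution id_list report k → Pre_solution id_list report k → Spec_solution id_list report k (solution id_list report k)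

-- ===== LEMMAS AND PROOFS =====

-- what A's loop body does to the state on a well-formed line, as a function of the pair
def stepA (st : StA) (p : String × String) : StA :=
  let users := st.1.modify p.1 PySem.Set.empty (fun s => PySem.Set.add s p.2)
  let mails := st.2.1.modify p.2 PySem.Set.empty (fun s => PySem.Set.add s (p.1 ++ p.2))
  if (st.2.2.2.getD p.1 PySem.Dict.empty).contains p.2 then
    (users, mails, st.2.2.1, st.2.2.2)
  else
    (users, mails, st.2.2.1.modify p.2 0 (· + 1),
     st.2.2.2.modify p.1 PySem.Dict.empty (fun d => d.insert p.2 true))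

-- under Pre_, A's fold over report is the fold of stepA over the extracted pairs
lemma foldA_eq (report : List String)
    (h : ∀ r ∈ report, ((PySem.Str.split? r " ").getD []).length = 2) :
    report.foldl bodyA initA = (report.map pairOf).foldl stepA initA := by
  rw [List.foldl_map]
  refine PySem.List.foldl_congr_mem _ _ _ _ (fun st r hr => ?_)
  have h2 := h r hr
  cases hsp : (PySem.Str.split? r " ").getD [] with
  | nil => rw [hsp] at h2; simp at h2
  | cons u rest =>
    cases rest with
    | nil => rw [hsp] at h2; simp at h2
    | cons t rest2 =>
      cases rest2 with
      | cons y ys => rw [hsp] at h2; simp at h2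
      | nil => simp [bodyA, stepA, pairOf, hsp]

-- how A's loop body rewrites on each side of the overlap_check test
lemma stepA_pos (st : StA) (p : String × String)
    (h : (st.2.2.2.getD p.1 PySem.Dict.empty).contains p.2 = true) :
    stepA st p = (st.1.modify p.1 PySem.Set.empty (fun s => PySem.Set.add s p.2),
                  st.2.1.modify p.2 PySem.Set.empty (fun s => PySem.Set.add s (p.1 ++ p.2)),
                  st.2.2.1, st.2.2.2) := by
  simp [stepA, h]

lemma stepA_neg (st : StA) (p : String × String)
    (h : (st.2.2.2.getD p.1 PySem.Dict.empty).contains p.2 = false) :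
    stepA st p = (st.1.modify p.1 PySem.Set.empty (fun s => PySem.Set.add s p.2),
                  st.2.1.modify p.2 PySem.Set.empty (fun s => PySem.Set.add s (p.1 ++ p.2)),
                  st.2.2.1.modify p.2 0 (· + 1),
                  st.2.2.2.modify p.1 PySem.Dict.empty (fun d => d.insert p.2 true)) := by
  simp [stepA, h]

-- the state invariant of A's loop, stated against the deduped pair set
lemma invA (q : List (String × String)) :
    (∀ x, (q.foldl stepA initA).1.getD x PySem.Set.empty
          = ((PySem.Set.ofList q).filter (fun p => p.1 == x)).map (fun p => p.2))
    ∧ (∀ x, (q.foldl stepA initA).2.2.1.getD x 0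
          = ((PySem.Set.ofList q).countP (fun p => p.2 == x) : Int))
    ∧ (∀ a b, ((q.foldl stepA initA).2.2.2.getD a PySem.Dict.empty).contains b
          = (PySem.Set.ofList q).contains (a, b)) := by
  induction q using List.reverseRecOn with
  | nil =>
    refine ⟨fun x => ?_, fun x => ?_, fun a b => ?_⟩ <;>
      simp [initA, PySem.Set.ofList]
  | append_singleton q r ih =>
    obtain ⟨ha, hb, hc⟩ := ih
    have hS : PySem.Set.ofList (q ++ [r]) = (PySem.Set.ofList q).add r :=
      PySem.Set.ofList_append_singleton q r
    simp only [List.foldl_append, List.foldl_cons, List.foldl_nil, hS]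
    by_cases hmem : r ∈ PySem.Set.ofList q
    · have hcr : ((q.foldl stepA initA).2.2.2.getD r.1 PySem.Dict.empty).contains r.2 = true := by
        rw [hc]
        simp [PySem.Set.contains_eq_listContains, List.contains_eq_mem, Prod.mk.eta, hmem]
      rw [PySem.Set.add_of_mem hmem, stepA_pos _ _ hcr]
      refine ⟨fun x => ?_, hb, hc⟩
      rw [PySem.Dict.getD_modify]
      by_cases hx : x = r.1
      · subst hx
        rw [if_pos rfl, ha]
        exact PySem.Set.add_of_mem
          (List.mem_map.mpr ⟨r, List.mem_filter.mpr ⟨hmem, by simp⟩, rfl⟩)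
      · rw [if_neg hx, ha]
    · have hcr : ((q.foldl stepA initA).2.2.2.getD r.1 PySem.Dict.empty).contains r.2 = false := by
        rw [hc]
        simp [PySem.Set.contains_eq_listContains, List.contains_eq_mem, Prod.mk.eta, hmem]
      rw [PySem.Set.add_of_not_mem hmem, stepA_neg _ _ hcr]
      refine ⟨fun x => ?_, fun x => ?_, fun a b => ?_⟩
      · rw [PySem.Dict.getD_modify]
        by_cases hx : x = r.1
        · subst hx
          rw [if_pos rfl, ha]
          have hr2 : r.2 ∉ ((PySem.Set.ofList q).filter (fun p => p.1 == r.1)).map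
              (fun p => p.2) := by
            intro hmm
            obtain ⟨p, hpf, hp2⟩ := List.mem_map.mp hmm
            obtain ⟨hpS, hp1⟩ := List.mem_filter.mp hpf
            have hp : p = r := by
              have h1 : p.1 = r.1 := by simpa using hp1
              exact Prod.ext h1 hp2
            exact hmem (hp ▸ hpS)
          rw [PySem.Set.add_of_not_mem hr2]
          simp [List.filter_append]
        · rw [if_neg hx, ha]
          have hne : ((r.1 : String) == x) = false := by
            simpa using fun h => hx h.symm
          simp [List.filter_append, hne]
      · rw [PySem.Dict.getD_modify]
        by_cases hx : x = r.2
        · subst hx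
          rw [if_pos rfl, hb]
          simp [List.countP_append]
        · rw [if_neg hx, hb]
          have hne : ((r.2 : String) == x) = false := by
            simpa using fun h => hx h.symm
          simp [List.countP_append, hne]
      · rw [PySem.Dict.getD_modify]
        by_cases hx : a = r.1
        · subst hx
          rw [if_pos rfl, PySem.Dict.contains_insert, hc]
          simp only [PySem.Set.contains_eq_listContains, List.contains_eq_mem]
          by_cases hb2 : b = r.2 <;>
            by_cases hS2 : (r.1, b) ∈ PySem.Set.ofList q <;>
              simp [hb2, hS2, List.mem_append, Prod.ext_iff]
        · rw [if_neg hx, hc]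
          simp only [PySem.Set.contains_eq_listContains, List.contains_eq_mem]
          have hne : ¬ ((a, b) = r) := fun h => hx (congrArg Prod.fst h)
          simp [List.mem_append, hne]

-- B's initialisation dict {i: 0 for i in id_list}
lemma init0_lemma (ids : List String) (d : PySem.Dict String Int) (i : String) :
    ((ids.foldl (fun d j => d.insert j 0) d).getD i 0 = if i ∈ ids then 0 else d.getD i 0)
    ∧ ((ids.foldl (fun d j => d.insert j 0) d).contains i = (decide (i ∈ ids) || d.contains i)) := by
  induction ids generalizing d with
  | nil => simp
  | cons j ids ih =>
    refine ⟨?_, ?_⟩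
    · rw [List.foldl_cons, (ih (d.insert j 0)).1, PySem.Dict.getD_insert]
      by_cases h1 : i ∈ ids <;> by_cases h2 : i = j <;> simp [h1, h2]
    · rw [List.foldl_cons, (ih (d.insert j 0)).2, PySem.Dict.contains_insert]
      by_cases h1 : i ∈ ids <;> by_cases h2 : i = j <;> simp [h1, h2]

-- B's accumulating pass over the deduped pairs
lemma foldR (g : String × String → Bool) (q : List (String × String))
    (d : PySem.Dict String Int) (i : String) :
    ((q.foldl (fun d p => if d.contains p.1 && g p then d.modify p.1 0 (· + 1) else d) d).getD i 0
        = d.getD i 0 + if d.contains i = true then (q.countP (fun p => p.1 == i && g p) : Int) else 0)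
    ∧ (∀ x, (q.foldl (fun d p => if d.contains p.1 && g p then d.modify p.1 0 (· + 1) else d) d).contains x
        = d.contains x) := by
  induction q generalizing d with
  | nil => simp
  | cons p q ih =>
    simp only [List.foldl_cons]
    by_cases hg : (d.contains p.1 && g p) = true
    · have hg' := hg
      rw [Bool.and_eq_true] at hg'
      obtain ⟨hcp, hgp⟩ := hg' 
      have hkeys : ∀ x, (d.modify p.1 0 (· + 1)).contains x = d.contains x := by
        intro x
        rw [PySem.Dict.contains_modify]
        by_cases hx : x = p.1
        · simp [hx, hcp]
        · simp [hx]
      rw [if_pos hg]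
      refine ⟨?_, fun x => ((ih _).2 x).trans (hkeys x)⟩
      rw [(ih _).1]
      rw [hkeys, PySem.Dict.getD_modify]
      by_cases hip : i = p.1
      · subst hip
        simp only [hcp, List.countP_cons, beq_self_eq_true,
          Bool.true_and, hgp, if_pos]
        push_cast
        ring
      · rw [if_neg hip]
        have : ((p.1 : String) == i) = false := by
          simpa using fun h => hip h.symm
        simp [this]
    · rw [if_neg hg]
      refine ⟨?_, (ih d).2⟩
      rw [(ih d).1]
      by_cases hci : d.contains i = true
      · simp only [hci, if_true, List.countP_cons]
        have hhead : (p.1 == i && g p) = false := by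
          by_cases hpi : p.1 = i
          · have : d.contains p.1 = true := by rw [hpi]; exact hci
            have : g p = false := by
              cases hgp : g p
              · rfl
              · exact absurd (by rw [this, hgp]; rfl) hg
            simp [this]
          · have : ((p.1 : String) == i) = false := by simpa using hpi
            simp [this]
        simp [hhead]
      · simp [hci]

-- ===== VERDICT (by name: the statement is the Claim_ definition above) =====
theorem solution_spec : Claim_equal_solution := by
  intro ids report k _ hpre
  unfold Spec_solution solution solution_alt
  rw [foldA_eq report hpre]
  obtain ⟨ha, hb, hc⟩ := invA (report.map pairOf)
  simp only [PySem.List.foldl_append_singleton_eq_map, List.nil_append]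
  refine List.map_congr_left (fun i hi => ?_)
  rw [PySem.List.foldl_ite_add_one
    (p := fun value => k ≤ ((report.map pairOf).foldl stepA initA).2.2.1.getD value 0)]
  rw [ha i]
  simp only [hb]
  rw [(foldR _ _ _ i).1]
  rw [(init0_lemma ids PySem.Dict.empty i).1, (init0_lemma ids PySem.Dict.empty i).2]
  simp only [hi, if_pos, PySem.Dict.getD_counter, PySem.Dict.contains_empty]
  rw [if_pos (by simp)]
  have hcnt : ∀ t : String,
      List.count t (List.map (fun p => p.2) (PySem.Set.ofList (List.map pairOf report)))
        = List.countP (fun p => p.2 == t) (PySem.Set.ofList (List.map pairOf report)) :=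
    fun t => by rw [List.count_eq_countP, List.countP_map]; rfl
  simp only [hcnt, List.countP_map, List.countP_filter]
  congr 1
  refine congrArg _ (List.countP_congr fun p hp => ?_)
  simp only [Function.comp_apply, Bool.and_eq_true, beq_iff_eq, decide_eq_true_eq]
  tauto
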